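-- pv_equiv track=rewrite | github.com/chrishofer/WS24_AI_SD1 | solutions/examples3/bsp1.py | duplikate
-- ===== SOURCE A (Python) =====
-- def duplikate(zahlen: list[list[int]]) -> list[int]:
--     dup = []
--
--     for i in range(len(zahlen)):
--         teilliste_als_set = set(zahlen[i])
--         if len(zahlen[i]) == len(teilliste_als_set):
--             dup.append(False)
--         else:
--             dup.append(True)
--
--     return dup
-- ===== SOURCE B (Python) =====
-- def duplikate(zahlen: list[list[int]]) -> list[int]:
--     dup = []
--     for teil in zahlen:
--         s = sorted(teil)
--         dup.append(any(x == y for x, y in zip(s, s[1:])))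
--     return dup
-- ===== Notes on version B (the rewrite author's own statement) =====
-- stated objective: alternative
-- what changed: Replaces the per-sublist set-cardinality comparison (len(sub) == len(set(sub))) with sorting a copy of each sublist and scanning adjacent pairs for an equal neighbour.
import Mathlib
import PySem

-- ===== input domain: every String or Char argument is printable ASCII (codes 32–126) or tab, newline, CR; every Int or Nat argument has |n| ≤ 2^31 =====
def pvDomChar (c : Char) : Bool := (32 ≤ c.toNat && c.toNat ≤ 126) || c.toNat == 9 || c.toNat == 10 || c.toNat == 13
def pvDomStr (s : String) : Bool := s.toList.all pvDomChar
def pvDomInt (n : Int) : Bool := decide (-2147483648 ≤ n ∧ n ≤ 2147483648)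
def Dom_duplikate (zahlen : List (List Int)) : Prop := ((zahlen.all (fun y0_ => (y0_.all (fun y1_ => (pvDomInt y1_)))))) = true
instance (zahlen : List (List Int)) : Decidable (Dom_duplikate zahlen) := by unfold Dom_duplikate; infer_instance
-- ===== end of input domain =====

-- B replaces the per-sublist set-cardinality test with sorting a copy and scanning adjacent pairs (alternative algorithm, same result).

-- ===== PORT A =====
-- for i in range(len(zahlen)): set(zahlen[i]); compare lengths; append False/True
def duplikate (zahlen : List (List Int)) : List Bool :=
  (PySem.List.pyRange 0 (PySem.List.len zahlen) 1).foldl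
    (fun dup i =>
      let teilliste_als_set : PySem.Set Int := PySem.Set.ofList (PySem.List.pyGetD zahlen i [])
      if PySem.List.len (PySem.List.pyGetD zahlen i []) == PySem.Set.len teilliste_als_set then
        dup ++ [false]
      else
        dup ++ [true]) []

-- ===== PORT B =====
-- for teil in zahlen: s = sorted(teil); append any(x == y for x, y in zip(s, s[1:]))
def duplikate_alt (zahlen : List (List Int)) : List Bool :=
  zahlen.foldl
    (fun dup teil =>
      let s := PySem.List.sorted teil (fun x => x) false
      dup ++ [(s.zip (PySem.List.slice s (some 1) none)).any (fun p => p.1 == p.2)]) []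

-- ===== PRECONDITION & SPEC =====
def Spec_duplikate (zahlen : List (List Int)) (out : List Bool) : Prop := out = duplikate_alt zahlen
instance (zahlen : List (List Int)) (out : List Bool) : Decidable (Spec_duplikate zahlen out) := by unfold Spec_duplikate; infer_instance

-- ===== CLAIM (what is proved, stated in full; the proofs are below) =====
def Claim_equal_duplikate : Prop := ∀ (zahlen : List (List Int)), Dom_duplikate zahlen → Spec_duplikate zahlen (duplikate zahlen)

-- ===== LEMMAS AND PROOFS =====

-- len(l) == len(set(l)) iff l has no duplicates
lemma lenSet_eq_iff (l : List Int) :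
    (PySem.List.len l == PySem.Set.len (PySem.Set.ofList l)) = true ↔ l.Nodup := by
  have hlen : (PySem.Set.ofList l).length = l.dedup.length := by
    apply List.Perm.length_eq
    rw [List.perm_ext_iff_of_nodup (PySem.Set.nodup_ofList l) l.nodup_dedup]
    intro x; rw [PySem.Set.mem_ofList, List.mem_dedup]
  simp only [PySem.List.len, PySem.Set.len, beq_iff_eq, hlen]
  constructor
  · intro h
    have h' : l.dedup.length = l.length := by omega
    have hs : l.dedup.Sublist l := List.dedup_sublist l
    rw [← hs.eq_of_length h']; exact l.nodup_dedup
  · intro h; rw [List.dedup_eq_self.mpr h]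

-- adjacent-equal scan of a (≤)-sorted list detects exactly the duplicates
lemma adjAny_sorted (s : List Int) (h : s.Pairwise (· ≤ ·)) :
    ((s.zip s.tail).any (fun p => p.1 == p.2)) = true ↔ ¬ s.Nodup := by
  induction s with
  | nil => simp
  | cons a t ih =>
    cases t with
    | nil => simp
    | cons b u =>
      have hab : a ≤ b := (List.pairwise_cons.mp h).1 b (by simp)
      by_cases hEq : a = b
      · subst hEq
        simp [List.zip]
      · have ha_not : a ∉ b :: u := by
          intro hmem
          rcases List.mem_cons.mp hmem with h1 | h2
          · exact hEq h1
          · have hbu : b ≤ a := (List.pairwise_cons.mp (List.pairwise_cons.mp h).2).1 a h2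
            exact hEq (le_antisymm hab hbu)
        have ih' := ih (List.pairwise_cons.mp h).2
        simp only [List.tail, List.zip] at ih' ⊢
        simp only [List.zipWith, List.any_cons, Bool.or_eq_true, beq_iff_eq]
        constructor
        · rintro (h1 | h2)
          · exact absurd h1 hEq
          · intro hn
            exact (ih'.mp h2) (List.nodup_cons.mp hn).2
        · intro hn
          right
          apply ih'.mpr
          intro hnd
          exact hn (List.nodup_cons.mpr ⟨ha_not, hnd⟩)

-- the two per-sublist flags coincide
lemma flag_eq (l : List Int) :
    (if PySem.List.len l == PySem.Set.len (PySem.Set.ofList l) then false else true)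
      = ((PySem.List.sorted l (fun x => x) false).zip
          (PySem.List.slice (PySem.List.sorted l (fun x => x) false) (some 1) none)).any
          (fun p => p.1 == p.2) := by
  set s := PySem.List.sorted l (fun x => x) false with hs
  rw [PySem.List.slice_from_one]
  have hpw : s.Pairwise (· ≤ ·) := PySem.List.sorted_pairwise l (fun x => x)
  have hperm : s.Perm l := PySem.List.sorted_perm l (fun x => x) false
  have hnd : s.Nodup ↔ l.Nodup := hperm.nodup_iff
  have hadj := adjAny_sorted s hpw
  by_cases h : l.Nodup
  · rw [if_pos ((lenSet_eq_iff l).mpr h)]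
    cases hb : ((s.zip s.tail).any (fun p => p.1 == p.2)) with
    | false => rfl
    | true => exact absurd (hnd.mpr h) (hadj.mp hb)
  · rw [if_neg (fun hc => h ((lenSet_eq_iff l).mp hc))]
    exact (hadj.mpr (fun hn => h (hnd.mp hn))).symm

-- both ports are the map of their per-sublist flag
lemma duplikate_eq_map (zahlen : List (List Int)) :
    duplikate zahlen = zahlen.map
      (fun l => if PySem.List.len l == PySem.Set.len (PySem.Set.ofList l) then false else true) := by
  unfold duplikate
  have hfun : (fun (dup : List Bool) (i : Int) =>
      let teilliste_als_set : PySem.Set Int := PySem.Set.ofList (PySem.List.pyGetD zahlen i [])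
      if PySem.List.len (PySem.List.pyGetD zahlen i []) == PySem.Set.len teilliste_als_set then
        dup ++ [false] else dup ++ [true])
    = (fun dup i => dup ++ [if PySem.List.len (PySem.List.pyGetD zahlen i []) ==
        PySem.Set.len (PySem.Set.ofList (PySem.List.pyGetD zahlen i [])) then false else true]) := by
    funext dup i; simp only []; split <;> rfl
  rw [hfun,
    PySem.List.foldl_pyRange_zero_pyGetD zahlen []
      (fun dup l => dup ++ [if PySem.List.len l == PySem.Set.len (PySem.Set.ofList l) then false else true]) [],
    PySem.List.foldl_append_singleton_eq_map]
  rfl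

lemma duplikate_alt_eq_map (zahlen : List (List Int)) :
    duplikate_alt zahlen = zahlen.map
      (fun l => ((PySem.List.sorted l (fun x => x) false).zip
          (PySem.List.slice (PySem.List.sorted l (fun x => x) false) (some 1) none)).any
          (fun p => p.1 == p.2)) := by
  unfold duplikate_alt
  rw [PySem.List.foldl_append_singleton_eq_map]
  rfl

-- ===== VERDICT (by name: the statement is the Claim_ definition above) =====
theorem duplikate_spec : Claim_equal_duplikate := by
  intro zahlen _
  unfold Spec_duplikate
  rw [duplikate_eq_map, duplikate_alt_eq_map]
  exact List.map_congr_left (fun l _ => flag_eq l)
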